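-- pv_equiv track=rewrite | github.com/reynaldicheok/StegoDetectoLive | modules/Steganalysis.py | discrimination_function
-- ===== SOURCE A (Python) =====
-- def discrimination_function(group):
--     # Initialize the total discrimination amount
--     amount = 0
--     total_rows = len(group)
--     total_columns = len(group[0])
--
--     # Calculate discrimination for each pair of adjacent columns
--     for row in range(total_rows):
--         for column in range(total_columns - 1):  # Avoid index out-of-range error
--             amount += abs(group[row][column] - group[row][column + 1])
--
--     # Calculate discrimination for each pair of adjacent rows
--     for column in range(total_columns):
--         for row in range(total_rows - 1):
--             amount += abs(group[row][column] - group[row + 1][column])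
--
--     return amount
-- ===== SOURCE B (Python) =====
-- def discrimination_function(group):
--     # Single streaming pass over the grid: carry the previous row and the
--     # previous cell, adding each adjacent difference the moment its second
--     # member is seen.
--     width = len(group[0])
--     total = 0
--     prev = None
--     for row in group:
--         last = None
--         for j in range(width):
--             x = row[j]
--             if last is not None:
--                 total += abs(last - x)
--             if prev is not None:
--                 total += abs(prev[j] - x)
--             last = x
--         prev = row
--     return total
-- ===== Notes on version B (the rewrite author's own statement) =====
-- stated objective: alternative
-- what changed: Replaces A's two staged index-driven loop nests (a horizontal pass over the whole grid, then a separate column-major vertical pass) by one streaming traversal that reads the grid once, carrying the previous cell and the previous row as state and emitting each adjacent difference as soon as its second member is reached.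
import Mathlib
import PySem

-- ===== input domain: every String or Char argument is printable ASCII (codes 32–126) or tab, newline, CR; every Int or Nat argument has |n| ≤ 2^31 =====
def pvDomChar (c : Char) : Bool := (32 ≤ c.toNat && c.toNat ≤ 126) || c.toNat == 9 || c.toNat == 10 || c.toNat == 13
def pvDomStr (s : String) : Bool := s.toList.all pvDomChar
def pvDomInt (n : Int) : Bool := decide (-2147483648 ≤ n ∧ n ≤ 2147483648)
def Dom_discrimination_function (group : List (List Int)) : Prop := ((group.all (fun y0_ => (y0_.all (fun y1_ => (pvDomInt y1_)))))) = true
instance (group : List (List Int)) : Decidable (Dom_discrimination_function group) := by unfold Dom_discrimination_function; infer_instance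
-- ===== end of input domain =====

-- B replaces A's two staged loop nests (horizontal pass, then a column-major
-- vertical pass) by ONE streaming traversal of the grid carrying the previous
-- cell and the previous row as state; objective: alternative, same cost.

-- ===== PORT A =====
def discrimination_function (group : List (List Int)) : Int :=
  let amount : Int := 0
  let total_rows : Int := group.length
  let total_columns : Int := (PySem.List.pyGetD group 0 []).length
  let amount :=
    (PySem.List.pyRange 0 total_rows 1).foldl (fun amt row =>
      (PySem.List.pyRange 0 (total_columns - 1) 1).foldl (fun amt column =>
        amt + |PySem.List.pyGetD (PySem.List.pyGetD group row []) column 0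
              - PySem.List.pyGetD (PySem.List.pyGetD group row []) (column + 1) 0|) amt) amount
  let amount :=
    (PySem.List.pyRange 0 total_columns 1).foldl (fun amt column =>
      (PySem.List.pyRange 0 (total_rows - 1) 1).foldl (fun amt row =>
        amt + |PySem.List.pyGetD (PySem.List.pyGetD group row []) column 0
              - PySem.List.pyGetD (PySem.List.pyGetD group (row + 1) []) column 0|) amt) amount
  amount

-- ===== PORT B =====
-- the inner-loop body of Source B: state (last cell seen, running total), index j
def pvStep (prev : Option (List Int)) (row : List Int) (s : Option Int × Int) (j : Nat) : Option Int × Int :=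
  let x := row.getD j 0
  let t1 := match s.1 with
    | some last => s.2 + |last - x|
    | none => s.2
  let t2 := match prev with
    | some p => t1 + |p.getD j 0 - x|
    | none => t1
  (some x, t2)

-- the outer-loop body of Source B: state (previous row, running total)
def pvOuter (width : Nat) (st : Option (List Int) × Int) (row : List Int) : Option (List Int) × Int :=
  let inner := (List.range width).foldl (pvStep st.1 row) (none, st.2)
  (some row, inner.2)

def discrimination_function_alt (group : List (List Int)) : Int :=
  let width : Nat := (group.headD []).length
  (group.foldl (pvOuter width) ((none : Option (List Int)), (0 : Int))).2

-- ===== PRECONDITION & SPEC =====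
-- Pre_ excludes exactly the inputs on which Python A raises IndexError: the empty grid
-- (len(group[0])) and ragged grids with a row shorter than the first row.
def Pre_discrimination_function (group : List (List Int)) : Prop :=
  group ≠ [] ∧ ∀ r ∈ group, (group.headD []).length ≤ r.length
instance (group : List (List Int)) : Decidable (Pre_discrimination_function group) := by
  unfold Pre_discrimination_function; infer_instance
def pvWitness_discrimination_function : List (List Int) := [[1, 2], [3, 5]]

def Spec_discrimination_function (group : List (List Int)) (out : Int) : Prop := out = discrimination_function_alt group
instance (group : List (List Int)) (out : Int) : Decidable (Spec_discrimination_function group out) := by unfold Spec_discrimination_function; infer_instance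

-- ===== CLAIM (what is proved, stated in full; the proofs are below) =====
def Claim_equal_discrimination_function : Prop := ∀ (group : List (List Int)), Dom_discrimination_function group → Pre_discrimination_function group → Spec_discrimination_function group (discrimination_function group)

-- ===== LEMMAS AND PROOFS =====

-- horizontal cost of one row (first w cells), index form
def pvH (w : Nat) (r : List Int) : Int :=
  ((List.range (w - 1)).map (fun c => |r.getD c 0 - r.getD (c + 1) 0|)).sum

-- vertical cost between two rows (first w cells), index form
def pvV (w : Nat) (p r : List Int) : Int :=
  ((List.range w).map (fun c => |p.getD c 0 - r.getD c 0|)).sum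

-- vertical cost summed over consecutive row pairs
def pvPairV (w : Nat) : List (List Int) → Int
  | [] => 0
  | [_] => 0
  | a :: b :: t => pvV w a b + pvPairV w (b :: t)

-- the inner streaming loop of B computes pvH plus (if there is a previous row) pvV
theorem pv_inner (prev : Option (List Int)) (row : List Int) (t0 : Int) (w : Nat) :
    (List.range w).foldl (pvStep prev row) (none, t0)
      = ((if w = 0 then none else some (row.getD (w - 1) 0)),
         t0 + pvH w row + (prev.elim 0 (fun p => pvV w p row))) := by
  induction w with
  | zero => cases prev <;> simp [pvH, pvV]
  | succ n ih =>
    rw [List.range_succ, List.foldl_append, ih]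
    cases n with
    | zero => cases prev <;> simp [pvStep, pvH, pvV]
    | succ m =>
      cases prev <;>
        simp [pvStep, pvH, pvV, List.range_succ] <;> ring

-- the outer streaming loop of B computes the row sums plus the pair sums
theorem pv_outer (w : Nat) (rows : List (List Int)) : ∀ (p : Option (List Int)) (t0 : Int),
    (rows.foldl (pvOuter w) (p, t0)).2
      = t0 + (rows.map (pvH w)).sum + pvPairV w (p.elim rows (fun q => q :: rows)) := by
  induction rows with
  | nil => intro p t0; cases p <;> simp [pvPairV]
  | cons r rs ih =>
    intro p t0
    simp only [List.foldl_cons]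
    have hst : pvOuter w (p, t0) r
        = (some r, t0 + pvH w r + (p.elim 0 (fun q => pvV w q r))) := by
      simp [pvOuter, pv_inner]
    rw [hst, ih]
    cases p <;> simp [pvPairV] <;> ring

-- exchange the order of a double list sum
theorem pv_sum_map_comm {α β : Type} (la : List α) (lb : List β) (f : α → β → Int) :
    (la.map (fun a => (lb.map (fun b => f a b)).sum)).sum
      = (lb.map (fun b => (la.map (fun a => f a b)).sum)).sum := by
  induction la with
  | nil => simp
  | cons a la ih =>
      simp only [List.map_cons, List.sum_cons, ih]
      rw [PySem.List.sum_map_add_int]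

-- an indexed map over all valid indices is a map over the list
theorem pv_map_index {β : Type} (G : List (List Int)) (F : List Int → β) :
    (PySem.List.pyRange 0 (G.length : Int) 1).map (fun row => F (PySem.List.pyGetD G row ([] : List Int))) = G.map F := by
  have hc : (fun row => F (PySem.List.pyGetD G row ([] : List Int)))
      = F ∘ (fun row => PySem.List.pyGetD G row ([] : List Int)) := rfl
  rw [hc, ← List.map_map, PySem.List.map_pyGetD_pyRange_zero']

-- A's horizontal inner loop sum equals pvH
theorem pv_row_horiz (r : List Int) (w : Nat) :
    ((PySem.List.pyRange 0 ((w : Int) - 1) 1).map (fun col =>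
        |PySem.List.pyGetD r col 0 - PySem.List.pyGetD r (col + 1) 0|)).sum
      = pvH w r := by
  rw [PySem.List.pyRange_one, List.map_map]
  have h2 : (((w : Int) - 1) - 0).toNat = w - 1 := by omega
  rw [h2]
  unfold pvH
  refine congrArg List.sum (List.map_congr_left ?_)
  intro c _
  have e3 : PySem.List.pyGetD r ((c : Int) + 1) 0 = r.getD (c + 1) 0 := by
    rw [show ((c : Int) + 1) = ((c + 1 : Nat) : Int) by push_cast; ring, PySem.List.pyGetD_natCast]
  simp [e3, PySem.List.pyGetD_natCast]

-- the index-pair sum of vertical costs equals pvPairV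
theorem pv_pair_index (w : Nat) (g : List (List Int)) :
    ((List.range (g.length - 1)).map (fun i =>
        pvV w (g.getD i []) (g.getD (i + 1) []))).sum = pvPairV w g := by
  induction g with
  | nil => simp [pvPairV]
  | cons a t ih =>
    cases t with
    | nil => simp [pvPairV]
    | cons b s =>
      have hlen : (a :: b :: s).length - 1 = (b :: s).length - 1 + 1 := by simp
      rw [hlen, List.range_succ_eq_map, List.map_cons, List.map_map, List.sum_cons]
      have hmap : ((List.range ((b :: s).length - 1)).map
            ((fun i => pvV w ((a :: b :: s).getD i []) ((a :: b :: s).getD (i + 1) [])) ∘ Nat.succ)).sum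
          = ((List.range ((b :: s).length - 1)).map (fun i =>
            pvV w ((b :: s).getD i []) ((b :: s).getD (i + 1) []))).sum := by
        refine congrArg List.sum (List.map_congr_left ?_)
        intro i _
        simp [Function.comp]
      rw [hmap, ih]
      simp [pvPairV]

theorem discrimination_function_spec : Claim_equal_discrimination_function := by
  intro group _ hpre
  obtain ⟨hne, _⟩ := hpre
  obtain ⟨g0, gs, rfl⟩ := List.exists_cons_of_ne_nil hne
  unfold Spec_discrimination_function discrimination_function discrimination_function_alt
  simp only [PySem.List.pyGetD_zero_cons, List.headD_cons, PySem.List.foldl_add, zero_add]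
  rw [pv_outer g0.length (g0 :: gs) none 0]
  simp only [Option.elim, zero_add]
  congr 1
  · -- horizontal part
    have hH := pv_map_index (g0 :: gs) (fun r =>
        ((PySem.List.pyRange 0 ((g0.length : Int) - 1) 1).map (fun col =>
          |PySem.List.pyGetD r col 0 - PySem.List.pyGetD r (col + 1) 0|)).sum)
    rw [hH]
    refine congrArg List.sum (List.map_congr_left ?_)
    intro r _
    exact pv_row_horiz r g0.length
  · -- vertical part
    simp only [PySem.List.pyRange_one, List.map_map]
    have hw0 : (((g0.length : Int)) - 0).toNat = g0.length := by omega
    have hn1 : ((((g0 :: gs).length : Int)) - 1 - 0).toNat = (g0 :: gs).length - 1 := by omega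
    rw [hw0, hn1]
    simp only [Function.comp_def, zero_add]
    rw [pv_sum_map_comm]
    rw [← pv_pair_index g0.length (g0 :: gs)]
    refine congrArg List.sum (List.map_congr_left ?_)
    intro i _
    unfold pvV
    refine congrArg List.sum (List.map_congr_left ?_)
    intro c _
    have e_r : PySem.List.pyGetD (g0 :: gs) ((i : Int)) ([] : List Int) = (g0 :: gs).getD i [] := PySem.List.pyGetD_natCast ..
    have e_r1 : PySem.List.pyGetD (g0 :: gs) ((i : Int) + 1) ([] : List Int) = (g0 :: gs).getD (i + 1) [] := by
      rw [show ((i : Int) + 1) = ((i + 1 : Nat) : Int) by push_cast; ring, PySem.List.pyGetD_natCast]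
    simp [e_r, e_r1, PySem.List.pyGetD_natCast]
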